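-- pv_equiv track=rewrite | github.com/hudsonc41/pythoncode | exempli/puzzlew.py | longest_rise
-- ===== SOURCE A (Python) =====
-- def longest_rise(stock_data):
--     rises = []
--     rise = 0
--     for i in range(1, len(stock_data)):
--         if stock_data[i] > stock_data[i - 1]:
--             rise += 1
--             if i == len(stock_data) - 1:
--                 rises.append(rise)
--         else:
--             rises.append(rise)
--             rise = 0
--     return rises
-- ===== SOURCE B (Python) =====
-- def longest_rise(stock_data):
--     n = len(stock_data)
--     downs = [i for i in range(1, n) if not (stock_data[i] > stock_data[i - 1])]
--     rises = []
--     prev = 0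
--     for q in downs:
--         rises.append(q - prev - 1)
--         prev = q
--     if n >= 2 and stock_data[-1] > stock_data[-2]:
--         rises.append(n - 1 - prev)
--     return rises
-- ===== Notes on version B (the rewrite author's own statement) =====
-- stated objective: alternative
-- what changed: Replaces A's single interleaved accumulate-and-emit loop with an index-then-gap pass: first collect the 'down' positions, then emit each rise length as the gap between consecutive down indices, with a separate final-rise append.
import Mathlib
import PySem

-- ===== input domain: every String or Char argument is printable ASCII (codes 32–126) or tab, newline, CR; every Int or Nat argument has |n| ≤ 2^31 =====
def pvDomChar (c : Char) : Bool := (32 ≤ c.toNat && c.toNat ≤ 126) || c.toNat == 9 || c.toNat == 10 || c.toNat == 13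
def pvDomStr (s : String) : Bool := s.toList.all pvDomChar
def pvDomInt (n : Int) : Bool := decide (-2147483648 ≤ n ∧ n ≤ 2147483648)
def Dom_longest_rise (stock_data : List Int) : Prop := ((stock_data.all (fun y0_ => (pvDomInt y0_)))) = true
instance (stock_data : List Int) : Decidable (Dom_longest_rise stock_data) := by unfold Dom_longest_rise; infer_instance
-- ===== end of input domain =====

-- B replaces A's interleaved accumulate-and-emit loop by an index-then-gap pass
-- (collect the 'down' positions, emit gaps between consecutive downs, separate final append);
-- same cost, different decomposition ('alternative').

-- ===== PORT A =====
-- A's loop body: on a rise, increment the counter (emitting it if at the last index);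
-- otherwise emit the counter and reset.  Indices i, i-1 are always in range, so pyGetD is exact.
def lrStepA (xs : List Int) (n : Int) (s : List Int × Int) (i : Int) : List Int × Int :=
  if PySem.List.pyGetD xs (i - 1) 0 < PySem.List.pyGetD xs i 0 then
    (if i = n - 1 then (s.1 ++ [s.2 + 1], s.2 + 1) else (s.1, s.2 + 1))
  else (s.1 ++ [s.2], 0)

def longest_rise (stock_data : List Int) : List Int :=
  ((PySem.List.pyRange 1 stock_data.length 1).foldl
    (lrStepA stock_data stock_data.length) ([], 0)).1

-- ===== PORT B =====
-- B's 'down' test: the negation of A's strict comparison; indices always in range.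
def lrDown (xs : List Int) (i : Int) : Bool :=
  !(PySem.List.pyGetD xs (i - 1) 0 < PySem.List.pyGetD xs i 0)

def lrStepB (s : List Int × Int) (q : Int) : List Int × Int :=
  (s.1 ++ [q - s.2 - 1], q)

def longest_rise_alt (stock_data : List Int) : List Int :=
  let n : Int := stock_data.length
  let downs := (PySem.List.pyRange 1 n 1).filter (lrDown stock_data)
  let st := downs.foldl lrStepB ([], 0)
  if 2 ≤ n ∧ PySem.List.pyGetD stock_data (-2) 0 < PySem.List.pyGetD stock_data (-1) 0 then
    st.1 ++ [n - 1 - st.2]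
  else st.1

-- ===== PRECONDITION & SPEC =====
def Spec_longest_rise (stock_data : List Int) (out : List Int) : Prop := out = longest_rise_alt stock_data
instance (stock_data : List Int) (out : List Int) : Decidable (Spec_longest_rise stock_data out) := by unfold Spec_longest_rise; infer_instance

-- ===== CLAIM (what is proved, stated in full; the proofs are below) =====
def Claim_equal_longest_rise : Prop := ∀ (stock_data : List Int), Dom_longest_rise stock_data → Spec_longest_rise stock_data (longest_rise stock_data)

-- ===== LEMMAS AND PROOFS =====

-- Core invariant: processing the consecutive indices j, j+1, …, n-1 (k of them),
-- with A's counter equal to j - 1 - prev (ups since the last down position prev),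
-- A's emitted list equals B's gap list over the downs among those indices,
-- plus B's trailing append exactly when the last index is still ahead and is an up.
lemma lr_core (xs : List Int) (k : Nat) :
    ∀ (j : Int) (acc : List Int) (prev : Int), 1 ≤ j → j + k = (xs.length : Int) →
    ((PySem.List.pyRange j xs.length 1).foldl (lrStepA xs xs.length) (acc, j - 1 - prev)).1 =
      (let st := ((PySem.List.pyRange j xs.length 1).filter (lrDown xs)).foldl lrStepB (acc, prev)
       if k ≠ 0 ∧ lrDown xs ((xs.length : Int) - 1) = false then
         st.1 ++ [(xs.length : Int) - 1 - st.2]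
       else st.1) := by
  induction k with
  | zero =>
      intro j acc prev hj hjk
      have hj' : j = (xs.length : Int) := by omega
      simp [hj']
  | succ k ih =>
      intro j acc prev hj hjk
      have hlt : j < (xs.length : Int) := by omega
      rw [PySem.List.pyRange_one_cons hlt]
      by_cases hup : PySem.List.pyGetD xs (j - 1) 0 < PySem.List.pyGetD xs j 0
      · have hdown : lrDown xs j = false := by simp [lrDown, hup]
        by_cases hlast : j = (xs.length : Int) - 1
        · -- last index, rising: A emits inside the loop, B via the trailing append
          have hk0 : k = 0 := by omega
          subst hk0
          have hrest : PySem.List.pyRange (j + 1) (xs.length : Int) 1 = [] := by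
            have h1 : j + 1 = (xs.length : Int) := by omega
            rw [h1]; simp
          have hone : j - 1 - prev + 1 = j - prev := by ring
          have hstep : lrStepA xs xs.length (acc, j - 1 - prev) j = (acc ++ [j - prev], j - prev) := by
            unfold lrStepA
            rw [if_pos hup, if_pos hlast, hone]
          rw [List.foldl_cons, hstep, hrest]
          simp [hdown, ← hlast]
        · -- rising, not last: counter increments, invariant j' - 1 - prev with j' = j+1
          have hstep : lrStepA xs xs.length (acc, j - 1 - prev) j = (acc, (j + 1) - 1 - prev) := by
            simp [lrStepA, hup, hlast]; omega
          rw [List.foldl_cons, hstep]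
          rw [ih (j + 1) acc prev (by omega) (by omega)]
          simp only [List.filter_cons, hdown]
          have hk0 : k ≠ 0 := by omega
          simp [hk0]
      · -- down at j: A emits the counter and resets; B records the gap and the new prev
        have hdown : lrDown xs j = true := by simp [lrDown, hup]
        have hstep : lrStepA xs xs.length (acc, j - 1 - prev) j
            = (acc ++ [j - prev - 1], (j + 1) - 1 - j) := by
          simp [lrStepA, hup]; omega
        rw [List.foldl_cons, hstep]
        rw [ih (j + 1) (acc ++ [j - prev - 1]) j (by omega) (by omega)]
        have hB : lrStepB (acc, prev) j = (acc ++ [j - prev - 1], j) := by simp [lrStepB]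
        simp only [List.filter_cons, hdown, if_pos, List.foldl_cons, hB]
        by_cases hk0 : k = 0
        · have hlast : (xs.length : Int) - 1 = j := by omega
          have hdl : lrDown xs ((xs.length : Int) - 1) = true := by rw [hlast]; exact hdown
          simp [hk0, hdl]
        · simp [hk0]

theorem longest_rise_spec : Claim_equal_longest_rise := by
  intro xs _
  unfold Spec_longest_rise longest_rise longest_rise_alt
  by_cases hn : 2 ≤ (xs.length : Int)
  · have hn2 : 2 ≤ xs.length := by exact_mod_cast hn
    have hcore := lr_core xs (xs.length - 1) 1 [] 0 (by omega) (by omega)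
    norm_num at hcore
    have hk : (xs.length - 1 : Nat) ≠ 0 := by omega
    have hneg1 : PySem.List.pyGetD xs (-1) 0 = xs[xs.length - 1]'(by omega) := by
      rw [PySem.List.pyGetD_neg_ofNat xs 1 0 (by omega) (by omega)]
    have hneg2 : PySem.List.pyGetD xs (-2) 0 = xs[xs.length - 2]'(by omega) := by
      rw [PySem.List.pyGetD_neg_ofNat xs 2 0 (by omega) (by omega)]
    have e1 : (xs.length : Int) - 1 - 1 = ((xs.length - 2 : Nat) : Int) := by omega
    have e0 : (xs.length : Int) - 1 = ((xs.length - 1 : Nat) : Int) := by omega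
    have hd : lrDown xs ((xs.length : Int) - 1)
        = !(decide (PySem.List.pyGetD xs (-2) 0 < PySem.List.pyGetD xs (-1) 0)) := by
      unfold lrDown
      rw [e1, e0, PySem.List.pyGetD_natCast, PySem.List.pyGetD_natCast, hneg1, hneg2,
          List.getD_eq_getElem _ _ (by omega), List.getD_eq_getElem _ _ (by omega)]
    rw [hcore]
    by_cases hup : PySem.List.pyGetD xs (-2) 0 < PySem.List.pyGetD xs (-1) 0
    · simp [hk, hd, hup, hn]
    · simp [hk, hd, hup, hn]
  · have hr : PySem.List.pyRange 1 xs.length 1 = [] := by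
      rw [PySem.List.pyRange_one]
      have h0 : ((xs.length : Int) - 1).toNat = 0 := by omega
      simp [h0]
    simp [hr, hn]
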